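-- pv_equiv track=rewrite | github.com/agpenas/advent-of-code-2024 | day4/code_logic.py | _verify_direction
-- ===== SOURCE A (Python) =====
-- from typing import List, Tuple
--
-- def _verify_direction(list_of_coordinates: List[Tuple[int, ...]]):
--     if len(list_of_coordinates) < 2:
--         return True
--     if len(set(x for x, _ in list_of_coordinates)) == 1:
--         # All x are the same == horizontal direction
--         return True
--     if len(set(y for _, y in list_of_coordinates)) == 1:
--         # All y are the same == vertical direction
--         return True
--     if len(set(x - y for x, y in list_of_coordinates)) == 1:
--         # All x-y are the same == standard diagonal direction
--         return True
--     if len(set(x + y for x, y in list_of_coordinates)) == 1: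
--         # All x+y are the same == reverse diagonal direction
--         return True
--     return False
-- ===== SOURCE B (Python) =====
-- def _verify_direction(list_of_coordinates):
--     if len(list_of_coordinates) < 2:
--         return True
--     x0, y0 = list_of_coordinates[0]
--     horiz = vert = diag = anti = True
--     for x, y in list_of_coordinates[1:]:
--         horiz = horiz and x == x0
--         vert = vert and y == y0
--         diag = diag and x - y == x0 - y0
--         anti = anti and x + y == x0 + y0
--     return horiz or vert or diag or anti
-- ===== Notes on version B (the rewrite author's own statement) =====
-- stated objective: simpler
-- what changed: Replaces the four set-comprehension/singleton-size checks with one pass over the tail that ANDs four boolean flags (same x, same y, same x-y, same x+y) against the first coordinate.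
import Mathlib
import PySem

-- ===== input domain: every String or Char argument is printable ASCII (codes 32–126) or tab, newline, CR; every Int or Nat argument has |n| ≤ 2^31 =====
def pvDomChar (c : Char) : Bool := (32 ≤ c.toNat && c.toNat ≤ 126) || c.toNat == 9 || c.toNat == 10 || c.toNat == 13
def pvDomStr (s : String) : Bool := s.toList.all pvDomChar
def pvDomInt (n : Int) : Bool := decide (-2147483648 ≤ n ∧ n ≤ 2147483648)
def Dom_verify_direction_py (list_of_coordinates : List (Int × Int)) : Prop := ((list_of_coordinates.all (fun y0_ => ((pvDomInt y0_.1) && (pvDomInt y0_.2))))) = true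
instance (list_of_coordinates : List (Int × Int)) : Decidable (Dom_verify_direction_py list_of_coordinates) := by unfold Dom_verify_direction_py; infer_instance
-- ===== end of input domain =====

-- B is a single pass with four boolean flags relative to the first coordinate,
-- instead of A's four set-builds each checked for singleton size (objective: simpler).

-- ===== PORT A =====
def verify_direction_py (list_of_coordinates : List (Int × Int)) : Bool :=
  if list_of_coordinates.length < 2 then true
  else if (PySem.Set.ofList (list_of_coordinates.map (fun p => p.1))).length == 1 then true
  else if (PySem.Set.ofList (list_of_coordinates.map (fun p => p.2))).length == 1 then true
  else if (PySem.Set.ofList (list_of_coordinates.map (fun p => p.1 - p.2))).length == 1 then true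
  else if (PySem.Set.ofList (list_of_coordinates.map (fun p => p.1 + p.2))).length == 1 then true
  else false

-- ===== PORT B =====
def verify_direction_py_alt (list_of_coordinates : List (Int × Int)) : Bool :=
  match list_of_coordinates with
  | [] => true
  | [_] => true
  | (x0, y0) :: rest =>
    let s := rest.foldl
      (fun (s : Bool × Bool × Bool × Bool) p =>
        (s.1 && (p.1 == x0), s.2.1 && (p.2 == y0),
         s.2.2.1 && (p.1 - p.2 == x0 - y0), s.2.2.2 && (p.1 + p.2 == x0 + y0)))
      (true, true, true, true)
    s.1 || s.2.1 || s.2.2.1 || s.2.2.2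

-- ===== PRECONDITION & SPEC =====
def Spec_verify_direction_py (list_of_coordinates : List (Int × Int)) (out : Bool) : Prop := out = verify_direction_py_alt list_of_coordinates
instance (list_of_coordinates : List (Int × Int)) (out : Bool) : Decidable (Spec_verify_direction_py list_of_coordinates out) := by unfold Spec_verify_direction_py; infer_instance

-- ===== CLAIM (what is proved, stated in full; the proofs are below) =====
def Claim_equal_verify_direction_py : Prop := ∀ (list_of_coordinates : List (Int × Int)), Dom_verify_direction_py list_of_coordinates → Spec_verify_direction_py list_of_coordinates (verify_direction_py list_of_coordinates)

-- ===== LEMMAS AND PROOFS =====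

-- the four-flag fold computes the four List.all's
theorem foldl_and4 {α : Type} (c1 c2 c3 c4 : α → Bool) :
    ∀ (l : List α) (b1 b2 b3 b4 : Bool),
      l.foldl (fun (s : Bool × Bool × Bool × Bool) p =>
        (s.1 && c1 p, s.2.1 && c2 p, s.2.2.1 && c3 p, s.2.2.2 && c4 p)) (b1, b2, b3, b4)
      = (b1 && l.all c1, b2 && l.all c2, b3 && l.all c3, b4 && l.all c4) := by
  intro l
  induction l with
  | nil => simp
  | cons a t ih =>
    intro b1 b2 b3 b4
    simp [List.foldl, ih, Bool.and_assoc]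

-- all-elements-equal t a → foldl add keeps the singleton [a]
theorem foldl_add_const {α : Type} [DecidableEq α] (a : α) :
    ∀ (t : List α), (∀ x ∈ t, x = a) →
      t.foldl PySem.Set.add [a] = [a] := by
  intro t
  induction t with
  | nil => intro _; rfl
  | cons b t ih =>
    intro h
    have hb : b = a := h b (by simp)
    subst hb
    have : PySem.Set.add [b] b = [b] := by simp [PySem.Set.add, PySem.Set.contains]
    simp only [List.foldl, this]
    exact ih (fun x hx => h x (by simp [hx]))

-- set of a nonempty list is a singleton iff every element equals the head
theorem ofList_len_one {α : Type} [DecidableEq α] (a : α) (t : List α) :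
    ((PySem.Set.ofList (a :: t)).length = 1) ↔ (∀ x ∈ t, x = a) := by
  constructor
  · intro h
    obtain ⟨b, hb⟩ := List.length_eq_one_iff.mp h
    have ha : a ∈ PySem.Set.ofList (a :: t) := by
      rw [PySem.Set.mem_ofList]; simp
    rw [hb] at ha
    have hab : b = a := ((List.mem_singleton).mp ha).symm
    intro x hx
    have : x ∈ PySem.Set.ofList (a :: t) := by
      rw [PySem.Set.mem_ofList]; simp [hx]
    rw [hb, hab] at this
    simpa using this
  · intro h
    rw [PySem.Set.ofList_eq_foldl]
    have h0 : PySem.Set.add ([] : List α) a = [a] := by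
      simp [PySem.Set.add, PySem.Set.contains]
    simp only [List.foldl, h0]
    rw [foldl_add_const a t h]
    rfl

-- ===== VERDICT (by name: the statement is the Claim_ definition above) =====
theorem verify_direction_py_spec : Claim_equal_verify_direction_py := by
  intro l _
  unfold Spec_verify_direction_py verify_direction_py verify_direction_py_alt
  match l with
  | [] => rfl
  | [p] => rfl
  | (x0, y0) :: q :: rest =>
    simp only [foldl_and4]
    have key : ∀ (f : Int × Int → Int),
        ((PySem.Set.ofList (((x0, y0) :: q :: rest).map f)).length == 1)
        = (q :: rest).all (fun p => f p == f (x0, y0)) := by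
      intro f
      simp only [List.map_cons]
      rw [show (f (x0,y0) :: f q :: rest.map f) = f (x0,y0) :: ((q :: rest).map f) by simp]
      rcases Bool.eq_false_or_eq_true ((q :: rest).all (fun p => f p == f (x0, y0))) with hall | hall
      · rw [hall]
        apply beq_iff_eq.mpr
        apply (ofList_len_one (f (x0,y0)) ((q :: rest).map f)).mpr
        intro x hx
        obtain ⟨p, hp, rfl⟩ := List.mem_map.mp hx
        have := (List.all_eq_true.mp hall) p hp
        simpa using this
      · rw [hall]
        apply beq_eq_false_iff_ne.mpr
        intro hlen
        have := (ofList_len_one (f (x0,y0)) ((q :: rest).map f)).mp (by exact_mod_cast hlen)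
        rw [List.all_eq_false] at hall
        obtain ⟨x, hx, hxf⟩ := hall
        have hne : f x ≠ f (x0, y0) := by simpa using hxf
        exact hne (this (f x) (List.mem_map_of_mem hx))
    have k1 := key (fun p => p.1)
    have k2 := key (fun p => p.2)
    have k3 := key (fun p => p.1 - p.2)
    have k4 := key (fun p => p.1 + p.2)
    rw [if_neg (by simp)]
    rw [k1, k2, k3, k4]
    rcases Bool.eq_false_or_eq_true ((q :: rest).all fun p => p.1 == x0) with h1 | h1 <;>
    rcases Bool.eq_false_or_eq_true ((q :: rest).all fun p => p.2 == y0) with h2 | h2 <;>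
    rcases Bool.eq_false_or_eq_true ((q :: rest).all fun p => p.1 - p.2 == x0 - y0) with h3 | h3 <;>
    rcases Bool.eq_false_or_eq_true ((q :: rest).all fun p => p.1 + p.2 == x0 + y0) with h4 | h4 <;>
    simp [h1, h2, h3, h4]
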